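-- pv_equiv track=rewrite | github.com/ryanyuchen/Data-Structure-and-Algorithms | 4 Algorithms on Strings/Week 2 Burrows-Wheeler Transform and Suffix Arrays/Programming-Assignment-2/bwmatching/bwmatching.py | PreprocessBWT
-- ===== SOURCE A (Python) =====
-- def PreprocessBWT(bwt):
--   """
--   Preprocess the Burrows-Wheeler Transform bwt of some text
--   and compute as a result:
--     * starts - for each character C in bwt, starts[C] is the first position
--         of this character in the sorted array of
--         all characters of the text.
--     * occ_count_before - for each character C in bwt and each position P in bwt,
--         occ_count_before[C][P] is the number of occurrences of character C in bwt
--         from position 0 to position P inclusive.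
--   """
--   # Implement this function yourself
--   LastCol = bwt
--   FirstCol = ''.join(sorted(LastCol))
--   CharSet = set(FirstCol)
--   starts = {x: FirstCol.find(x) for x in CharSet}
--
--   occ_count_before = {}
--   for char in CharSet:
--       counter = [0] * (len(LastCol) + 1)
--       for i in range(1, len(LastCol) + 1):
--           if bwt[i - 1] == char:
--               counter[i] = counter[i - 1] + 1
--           else:
--               counter[i] = counter[i - 1]
--       occ_count_before[char] = counter
--
--   return starts, occ_count_before
-- ===== SOURCE B (Python) =====
-- def PreprocessBWT(bwt):
--   """One pass over bwt: snapshot running per-character counts at every position;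
--   starts from cumulative totals of the sorted distinct characters (no full-string sort)."""
--   chars = sorted(set(bwt))
--   counts = {c: 0 for c in chars}
--   occ_count_before = {c: [0] for c in chars}
--   for ch in bwt:
--       counts[ch] += 1
--       for c in chars:
--           occ_count_before[c].append(counts[c])
--   starts = {}
--   total = 0
--   for c in chars:
--       starts[c] = total
--       total += counts[c]
--   return starts, occ_count_before
-- ===== Notes on version B (the rewrite author's own statement) =====
-- stated objective: alternative
-- what changed: B replaces A's sort-whole-string-then-find starts and its per-character full scans by a single pass over bwt that snapshots a running per-character count dict, deriving starts as cumulative totals over the sorted distinct characters.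
import Mathlib
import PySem

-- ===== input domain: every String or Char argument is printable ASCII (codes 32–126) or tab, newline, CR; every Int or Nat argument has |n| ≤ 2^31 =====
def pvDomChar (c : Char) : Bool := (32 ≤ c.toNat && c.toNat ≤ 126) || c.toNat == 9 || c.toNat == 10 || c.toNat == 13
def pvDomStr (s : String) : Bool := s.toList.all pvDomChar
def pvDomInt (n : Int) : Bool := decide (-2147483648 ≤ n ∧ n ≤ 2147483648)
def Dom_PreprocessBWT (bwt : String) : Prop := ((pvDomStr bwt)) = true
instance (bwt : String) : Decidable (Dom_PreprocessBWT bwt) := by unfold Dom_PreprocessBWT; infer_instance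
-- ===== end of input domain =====

-- B replaces A's per-character full scans and sort+find by one pass that snapshots a
-- running count dictionary, with starts derived from cumulative totals (objective: alternative decomposition).

-- ===== PORT A =====
-- inner loop of A: counter[i] = counter[i-1] + (1 if bwt[i-1] == char else 0), i = 1..n
def pvCounter (char : Char) : Int → List Char → List Int
  | _, [] => []
  | prev, x :: xs =>
      let cur := prev + (if x = char then 1 else 0)
      cur :: pvCounter char cur xs

def PreprocessBWT (bwt : String) : (List (String × Int)) × (List (String × List Int)) :=
  let LastCol := bwt.toList
  let FirstCol := PySem.List.sorted LastCol (fun x => x) false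
  let CharSet : PySem.Set Char := PySem.Set.ofList FirstCol
  let starts : PySem.Dict Char Int :=
    CharSet.foldl (fun d x => d.insert x (PySem.Chars.find FirstCol [x])) PySem.Dict.empty
  let occ : PySem.Dict Char (List Int) :=
    CharSet.foldl (fun d char => d.insert char ((0 : Int) :: pvCounter char 0 LastCol)) PySem.Dict.empty
  (starts.items.map (fun p => (String.ofList [p.1], p.2)),
   occ.items.map (fun p => (String.ofList [p.1], p.2)))

-- ===== PORT B =====
def PreprocessBWT_alt (bwt : String) : (List (String × Int)) × (List (String × List Int)) :=
  let l := bwt.toList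
  let chars := PySem.List.sorted (PySem.Set.ofList l) (fun x => x) false
  let counts0 : PySem.Dict Char Int := chars.foldl (fun d c => d.insert c 0) PySem.Dict.empty
  let occ0 : PySem.Dict Char (List Int) := chars.foldl (fun d c => d.insert c [(0 : Int)]) PySem.Dict.empty
  let fin := l.foldl
    (fun (st : PySem.Dict Char Int × PySem.Dict Char (List Int)) ch =>
      let counts := st.1.modify ch 0 (· + 1)
      (counts, chars.foldl (fun oc c => oc.modify c [] (fun v => v ++ [counts.getD c 0])) st.2))
    (counts0, occ0)
  let starts := chars.foldl
    (fun (st : PySem.Dict Char Int × Int) c => (st.1.insert c st.2, st.2 + fin.1.getD c 0))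
    (PySem.Dict.empty, 0)
  (starts.1.items.map (fun p => (String.ofList [p.1], p.2)),
   fin.2.items.map (fun p => (String.ofList [p.1], p.2)))

-- ===== PRECONDITION & SPEC =====
def Spec_PreprocessBWT (bwt : String) (out : (List (String × Int)) × (List (String × List Int))) : Prop := out = PreprocessBWT_alt bwt
instance (bwt : String) (out : (List (String × Int)) × (List (String × List Int))) : Decidable (Spec_PreprocessBWT bwt out) := by unfold Spec_PreprocessBWT; infer_instance

-- ===== CLAIM (what is proved, stated in full; the proofs are below) =====
def Claim_equal_PreprocessBWT : Prop := ∀ (bwt : String), Dom_PreprocessBWT bwt → Spec_PreprocessBWT bwt (PreprocessBWT bwt)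

-- ===== LEMMAS AND PROOFS =====

-- abbreviation used only in proofs: prefix-accumulating pairs, the shape of B's starts loop
def pvPref (g : Char → Int) : List Char → Int → List (Char × Int)
  | [], _ => []
  | c :: cs, a => (c, a) :: pvPref g cs (a + g c)

-- a Set.add fold only ever appends elements of the second list
theorem pv_foldl_add_sublist : ∀ (cs s : List Char), List.Sublist (cs.foldl PySem.Set.add s) (s ++ cs) := by
  intro cs
  induction cs with
  | nil => simp
  | cons c cs ih =>
    intro s
    refine List.Sublist.trans (ih (PySem.Set.add s c)) ?_
    have h1 : List.Sublist (PySem.Set.add s c) (s ++ [c]) := by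
      simp only [PySem.Set.add]
      split
      · exact List.sublist_append_left s [c]
      · exact List.Sublist.refl _
    have := h1.append (List.Sublist.refl cs)
    simpa using this

-- Set.ofList of a duplicate-free list is the list itself
theorem pv_ofList_nodup : ∀ (s cs : List Char), (s ++ cs).Nodup → cs.foldl PySem.Set.add s = s ++ cs := by
  intro s cs
  induction cs generalizing s with
  | nil => simp
  | cons c cs ih =>
    intro h
    have hc : c ∉ s := by
      intro hm
      exact (List.disjoint_of_nodup_append h) hm (by simp)
    have hadd : PySem.Set.add s c = s ++ [c] := by
      simp only [PySem.Set.add]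
      rw [if_neg]
      simp [hc]
    have := ih (s ++ [c]) (by simpa using h)
    simpa [hadd] using this

-- the distinct characters: dedup of the sorted string = sorted distinct characters
theorem pv_chars_eq (l : List Char) :
    PySem.Set.ofList (PySem.List.sorted l (fun x => x) false) =
      PySem.List.sorted (PySem.Set.ofList l) (fun x => x) false := by
  set S := PySem.List.sorted l (fun x => x) false with hS
  have hperm : (PySem.Set.ofList S).Perm (PySem.Set.ofList l) := by
    refine (List.perm_ext_iff_of_nodup (PySem.Set.nodup_ofList _) (PySem.Set.nodup_ofList _)).mpr ?_
    intro x
    rw [PySem.Set.mem_ofList, PySem.Set.mem_ofList, hS, PySem.List.mem_sorted]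
  have hle : S.Pairwise (· ≤ ·) := PySem.List.sorted_pairwise l (fun x => x)
  have hsub : List.Sublist (PySem.Set.ofList S) S := by
    rw [PySem.Set.ofList_eq_foldl]
    simpa using pv_foldl_add_sublist S []
  have hlt : (PySem.Set.ofList S).Pairwise (· < ·) := by
    have h1 : (PySem.Set.ofList S).Pairwise (· ≤ ·) := hle.sublist hsub
    have h2 : (PySem.Set.ofList S).Pairwise (· ≠ ·) := PySem.Set.nodup_ofList _
    exact (h1.and h2).imp (fun ⟨a, b⟩ => lt_of_le_of_ne a b)
  exact (PySem.List.sorted_eq_of_perm_of_pairwise_lt _ _ _ hperm hlt).symm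

-- insert-constant fold: lookup
theorem pv_getD_foldl_insert_const {ν : Type} (v dflt : ν) :
    ∀ (cs : List Char) (d : PySem.Dict Char ν) (x : Char),
      ((cs.foldl (fun d c => d.insert c v) d).getD x dflt) = if x ∈ cs then v else d.getD x dflt := by
  intro cs
  induction cs with
  | nil => simp
  | cons c cs ih =>
    intro d x
    rw [List.foldl_cons, ih]
    by_cases hx : x ∈ cs
    · simp [hx]
    · by_cases hxc : x = c <;> simp [hx, hxc, PySem.Dict.getD_insert]

-- insert-constant fold from empty: keys
theorem pv_keys_foldl_insert_const {ν : Type} (v : ν) (cs : List Char) (h : cs.Nodup) :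
    ((cs.foldl (fun d c => d.insert c v) PySem.Dict.empty).keys) = cs := by
  rw [PySem.Dict.keys_foldl_insert]
  simp only [PySem.Dict.keys_empty]
  show cs.foldl PySem.Set.add [] = cs
  simpa using pv_ofList_nodup [] cs (by simpa using h)

-- B's main loop, first component: the running count dict
theorem pv_main_fst (chars : List Char) :
    ∀ (l : List Char) (st : PySem.Dict Char Int × PySem.Dict Char (List Int)),
      (l.foldl (fun st ch =>
          (st.1.modify ch 0 (· + 1), chars.foldl (fun oc c => oc.modify c []
            (fun v => v ++ [(st.1.modify ch 0 (· + 1)).getD c 0])) st.2)) st).1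
        = l.foldl (fun d ch => d.modify ch 0 (· + 1)) st.1 := by
  intro l
  induction l with
  | nil => intro st; rfl
  | cons ch l ih => intro st; rw [List.foldl_cons, List.foldl_cons, ih]

-- B's inner snapshot fold: lookup
theorem pv_inner_getD (g : Char → Int) :
    ∀ (cs : List Char) (oc : PySem.Dict Char (List Int)) (x : Char), cs.Nodup →
      ((cs.foldl (fun oc c => oc.modify c [] (fun v => v ++ [g c])) oc).getD x [])
        = if x ∈ cs then oc.getD x [] ++ [g x] else oc.getD x [] := by
  intro cs
  induction cs with
  | nil => simp
  | cons c cs ih =>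
    intro oc x hnd
    rw [List.foldl_cons, ih _ _ hnd.of_cons]
    by_cases hx : x ∈ cs
    · have hxc : x ≠ c := by rintro rfl; exact (List.nodup_cons.mp hnd).1 hx
      simp [hx, hxc, PySem.Dict.getD_modify]
    · by_cases hxc : x = c <;>
        simp [hx, hxc, PySem.Dict.getD_modify, (List.nodup_cons.mp hnd).1]

-- B's inner snapshot fold: keys are unchanged when every snapshot key is present
theorem pv_inner_keys (g : Char → Int) :
    ∀ (cs : List Char) (oc : PySem.Dict Char (List Int)), (∀ c ∈ cs, c ∈ oc.keys) →
      ((cs.foldl (fun oc c => oc.modify c [] (fun v => v ++ [g c])) oc).keys) = oc.keys := by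
  intro cs
  induction cs with
  | nil => simp
  | cons c cs ih =>
    intro oc h
    rw [List.foldl_cons]
    have hc : (oc.modify c [] (fun v => v ++ [g c])).keys = oc.keys := by
      have hct : oc.contains c = true := (PySem.Dict.contains_iff_mem_keys oc c).mpr (h c (by simp))
      rw [PySem.Dict.keys_modify, PySem.Dict.keys_insert_of_contains (h := hct)]
    rw [ih _ (by rw [hc]; intro x hx; exact h x (by simp [hx])), hc]

-- B's main loop, second component: each per-character list grows exactly like A's counter loop
theorem pv_main_occ (chars : List Char) (hnd : chars.Nodup) :
    ∀ (l : List Char) (counts : PySem.Dict Char Int) (occ : PySem.Dict Char (List Int)),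
      occ.keys = chars → ∀ c ∈ chars,
      ((l.foldl (fun st ch =>
          (st.1.modify ch 0 (· + 1), chars.foldl (fun oc c => oc.modify c []
            (fun v => v ++ [(st.1.modify ch 0 (· + 1)).getD c 0])) st.2)) (counts, occ)).2).getD c []
        = occ.getD c [] ++ pvCounter c (counts.getD c 0) l := by
  intro l
  induction l with
  | nil => intro counts occ _ c _; simp [pvCounter]
  | cons ch l ih =>
    intro counts occ hk c hc
    rw [List.foldl_cons]
    have hk' : (chars.foldl (fun oc c => oc.modify c []
        (fun v => v ++ [(counts.modify ch 0 (· + 1)).getD c 0])) occ).keys = chars := by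
      rw [pv_inner_keys _ chars occ (fun x hx => by rw [hk]; exact hx)]; exact hk
    rw [ih _ _ hk' c hc]
    rw [pv_inner_getD _ chars occ c hnd]
    simp only [hc, if_pos]
    rw [PySem.Dict.getD_modify]
    by_cases hcch : c = ch
    · subst hcch; simp [pvCounter]
    · have : ¬ (ch = c) := fun h => hcch h.symm
      simp [pvCounter, hcch, this]

-- B's main loop: the key set of the snapshot dict never changes
theorem pv_main_keys (chars : List Char) :
    ∀ (l : List Char) (counts : PySem.Dict Char Int) (occ : PySem.Dict Char (List Int)),
      occ.keys = chars →
      ((l.foldl (fun st ch =>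
          (st.1.modify ch 0 (· + 1), chars.foldl (fun oc c => oc.modify c []
            (fun v => v ++ [(st.1.modify ch 0 (· + 1)).getD c 0])) st.2)) (counts, occ)).2).keys = chars := by
  intro l
  induction l with
  | nil => intro counts occ hk; exact hk
  | cons ch l ih =>
    intro counts occ hk
    rw [List.foldl_cons]
    exact ih _ _ (by
      rw [pv_inner_keys _ chars occ (fun x hx => by rw [hk]; exact hx)]
      exact hk)

-- B's starts loop: items
theorem pv_starts_items (g : Char → Int) :
    ∀ (cs : List Char) (d : PySem.Dict Char Int) (a : Int), cs.Nodup →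
      (∀ c ∈ cs, d.contains c = false) →
      ((cs.foldl (fun st c => (st.1.insert c st.2, st.2 + g c)) (d, a)).1).items
        = d.items ++ pvPref g cs a := by
  intro cs
  induction cs with
  | nil => simp [pvPref]
  | cons c cs ih =>
    intro d a hnd h
    rw [List.foldl_cons]
    have hcf : d.contains c = false := h c (by simp)
    have hnext : ∀ c' ∈ cs, (d.insert c a).contains c' = false := by
      intro c' hc'
      rw [PySem.Dict.contains_insert]
      have h1 : c' ≠ c := by rintro rfl; exact (List.nodup_cons.mp hnd).1 hc'
      simp [h1, h c' (by simp [hc'])]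
    rw [ih _ _ hnd.of_cons hnext, PySem.Dict.items_insert_of_not_contains (h := hcf)]
    simp [pvPref]

theorem pv_pref_length (g : Char → Int) : ∀ (cs : List Char) (a : Int), (pvPref g cs a).length = cs.length := by
  intro cs
  induction cs with
  | nil => intro a; rfl
  | cons c cs ih => intro a; simp [pvPref, ih]

theorem pv_pref_getElem (g : Char → Int) :
    ∀ (cs : List Char) (a : Int) (p : Nat) (h : p < cs.length),
      (pvPref g cs a)[p]'(by rw [pv_pref_length]; exact h) = (cs[p], a + ((cs.take p).map g).sum) := by
  intro cs
  induction cs with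
  | nil => intro a p h; simp at h
  | cons c cs ih =>
    intro a p h
    cases p with
    | zero => simp [pvPref]
    | succ p =>
      have hp : p < cs.length := by simpa using h
      have := ih (a + g c) p hp
      simp only [pvPref, List.getElem_cons_succ, this, List.take_succ_cons, List.map_cons,
        List.sum_cons]
      rw [add_assoc]

-- sum of per-character counts over a duplicate-free list = countP of membership
theorem pv_sum_counts (ds : List Char) (hnd : ds.Nodup) (l : List Char) :
    ((ds.map (fun d => l.count d)).sum) = l.countP (fun x => decide (x ∈ ds)) := by
  induction ds with
  | nil => simp
  | cons d ds ih =>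
    have hd : d ∉ ds := (List.nodup_cons.mp hnd).1
    have hsplit : ∀ (m : List Char), m.countP (fun x => decide (x ∈ d :: ds))
        = m.count d + m.countP (fun x => decide (x ∈ ds)) := by
      intro m
      induction m with
      | nil => simp
      | cons x m ihm =>
        simp only [List.countP_cons, List.count_cons, ihm]
        by_cases hxd : x = d
        · subst hxd
          simp [hd]
          omega
        · by_cases hxs : x ∈ ds <;> simp [hxd, hxs] <;> omega
    rw [hsplit]
    simp only [List.map_cons, List.sum_cons, ih hnd.of_cons]

-- membership in a strict-increasing prefix
theorem pv_mem_take (chars : List Char) (hlt : chars.Pairwise (· < ·)) (p : Nat) (hp : p < chars.length) (x : Char) :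
    x ∈ chars.take p ↔ x ∈ chars ∧ x < chars[p] := by
  have hpg := List.pairwise_iff_getElem.mp hlt
  constructor
  · intro hx
    obtain ⟨q, hq, hxq⟩ := List.mem_take_iff_getElem.mp hx
    have hq1 : q < p := lt_of_lt_of_le hq inf_le_left
    have hq2 : q < chars.length := lt_of_lt_of_le hq inf_le_right
    exact ⟨hxq ▸ List.getElem_mem hq2, hxq ▸ hpg q p hq2 hp hq1⟩
  · rintro ⟨hx, hlt'⟩
    obtain ⟨q, hq, hxq⟩ := List.mem_iff_getElem.mp hx
    have hqp : q < p := by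
      by_contra hge
      replace hge : p ≤ q := Nat.le_of_not_lt hge
      rcases Nat.lt_or_ge p q with h | h
      · exact absurd (hxq ▸ hpg p q hp hq h) (by subst hxq; exact fun h2 => lt_asymm hlt' h2)
      · have : p = q := le_antisymm hge h
        subst this
        rw [hxq] at hlt'
        exact lt_irrefl _ hlt'
    exact List.mem_take_iff_getElem.mpr ⟨q, lt_min hqp hq, hxq⟩

-- a singleton prefix is a head
theorem pv_singleton_prefix (L : List Char) (c : Char) : [c] <+: L ↔ L.head? = some c := by
  cases L with
  | nil => simp
  | cons x xs => simp [List.cons_prefix_cons, eq_comm]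

-- position of the first occurrence of c in a sorted list = number of smaller elements
theorem pv_find_sorted (S : List Char) (hS : S.Pairwise (· ≤ ·)) (c : Char) (hc : c ∈ S) :
    PySem.Chars.find S [c] = ((S.countP (fun x => decide (x < c)) : Nat) : Int) := by
  have hinf : [c] <:+: S := by
    obtain ⟨s, t, rfl⟩ := List.append_of_mem hc
    exact ⟨s, t, by simp⟩
  have h0 : 0 ≤ PySem.Chars.find S [c] := (PySem.Chars.find_nonneg_iff S [c]).mpr hinf
  obtain ⟨hpre, hmin⟩ := PySem.Chars.find_spec h0
  set i := (PySem.Chars.find S [c]).toNat with hi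
  have hgi : S[i]? = some c := by
    rw [← List.head?_drop]
    exact (pv_singleton_prefix _ c).mp hpre
  have hilen : i < S.length := by
    by_contra hge
    replace hge : S.length ≤ i := Nat.le_of_not_lt hge
    rw [List.getElem?_eq_none hge] at hgi
    simp at hgi
  have hSi : S[i] = c := by
    have := List.getElem?_eq_getElem hilen
    rw [this] at hgi
    exact Option.some.inj hgi
  have hpg := List.pairwise_iff_getElem.mp hS
  have hne : ∀ j (hj : j < i), S[j]'(lt_trans hj hilen) ≠ c := by
    intro j hj heq
    refine hmin j hj ((pv_singleton_prefix _ c).mpr ?_)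
    rw [List.head?_drop, List.getElem?_eq_getElem (lt_trans hj hilen), heq]
  -- countP over the prefix before i is i, over the rest is 0
  have hsplit : S.countP (fun x => decide (x < c)) =
      (S.take i).countP (fun x => decide (x < c)) + (S.drop i).countP (fun x => decide (x < c)) := by
    rw [← List.countP_append, List.take_append_drop]
  have htake : (S.take i).countP (fun x => decide (x < c)) = i := by
    have hall : ∀ x ∈ S.take i, decide (x < c) = true := by
      intro x hx
      obtain ⟨q, hq, hxq⟩ := List.mem_take_iff_getElem.mp hx
      have hq1 : q < i := lt_of_lt_of_le hq inf_le_left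
      have hq2 : q < S.length := lt_of_lt_of_le hq inf_le_right
      have hle : S[q] ≤ c := by
        rw [← hSi]
        exact hpg q i hq2 hilen hq1
      have hne' : S[q] ≠ c := hne q hq1
      simp only [decide_eq_true_eq]
      rw [← hxq]
      exact lt_of_le_of_ne hle hne' 
    rw [List.countP_eq_length.mpr hall, List.length_take]
    omega
  have hdrop : (S.drop i).countP (fun x => decide (x < c)) = 0 := by
    rw [List.countP_eq_zero]
    intro x hx
    obtain ⟨k, hk, hxk⟩ := List.mem_iff_getElem.mp hx
    rw [List.getElem_drop] at hxk
    have hik : i + k < S.length := by rw [List.length_drop] at hk; omega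
    have hge : c ≤ x := by
      rw [← hSi, ← hxk]
      rcases Nat.eq_zero_or_pos k with h | h
      · subst h; rfl
      · exact hpg i (i + k) hilen hik (by omega)
    simp only [decide_eq_true_eq]
    exact not_lt.mpr hge
  have : S.countP (fun x => decide (x < c)) = i := by
    rw [hsplit, htake, hdrop]
    omega
  rw [this, hi, Int.toNat_of_nonneg h0]


-- sums of Nat casts
theorem pv_cast_sum (xs : List Char) (f : Char → Nat) :
    (xs.map (fun c => ((f c : Nat) : Int))).sum = (((xs.map f).sum : Nat) : Int) := by
  induction xs with
  | nil => simp
  | cons x xs ih => simp [ih]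

-- the two ports agree
theorem pv_ab (bwt : String) : PreprocessBWT bwt = PreprocessBWT_alt bwt := by
  simp only [PreprocessBWT, PreprocessBWT_alt]
  rw [← pv_chars_eq bwt.toList]
  set l := bwt.toList with hl
  set S := PySem.List.sorted l (fun x => x) false with hS
  set cs := PySem.Set.ofList S with hcsdef
  set c0 := cs.foldl (fun d c => d.insert c (0 : Int)) PySem.Dict.empty with hc0def
  set o0 := cs.foldl (fun d c => d.insert c [(0 : Int)]) PySem.Dict.empty with ho0def
  set F := l.foldl (fun st ch => (st.1.modify ch 0 (· + 1),
      cs.foldl (fun oc c => oc.modify c [] (fun v => v ++ [(st.1.modify ch 0 (· + 1)).getD c 0])) st.2))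
      (c0, o0) with hF
  have hnd : cs.Nodup := PySem.Set.nodup_ofList S
  have hlt : cs.Pairwise (· < ·) := by
    rw [hcsdef, pv_chars_eq l]
    exact PySem.List.sorted_ofList_pairwise_lt l
  have hSle : S.Pairwise (· ≤ ·) := PySem.List.sorted_pairwise l (fun x => x)
  have hSperm : S.Perm l := PySem.List.sorted_perm l (fun x => x) false
  have hmem : ∀ x : Char, x ∈ cs ↔ x ∈ l := by
    intro x; rw [hcsdef, PySem.Set.mem_ofList, hS, PySem.List.mem_sorted]
  have hmemS : ∀ x : Char, x ∈ cs → x ∈ S := by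
    intro x hx
    rw [hS, PySem.List.mem_sorted]
    exact (hmem x).mp hx
  have hemptyContains : ∀ (ν : Type) (d0 : PySem.Dict Char ν) (hd : d0 = PySem.Dict.empty) (c : Char),
      c ∈ cs → d0.contains c = false := by
    intro ν d0 hd c _; rw [hd]; simp [PySem.Dict.contains_empty]
  -- A-side items
  have hA1 : (cs.foldl (fun d x => d.insert x (PySem.Chars.find S [x])) PySem.Dict.empty).items
      = cs.map (fun c => (c, PySem.Chars.find S [c])) := by
    rw [PySem.Dict.items_foldl_insert_fresh cs (fun a => a) (fun x => PySem.Chars.find S [x])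
      PySem.Dict.empty (fun a _ => by simp [PySem.Dict.contains_empty]) (by simpa using hnd)]
    rfl
  have hA2 : (cs.foldl (fun d char => d.insert char ((0 : Int) :: pvCounter char 0 l)) PySem.Dict.empty).items
      = cs.map (fun c => (c, (0 : Int) :: pvCounter c 0 l)) := by
    rw [PySem.Dict.items_foldl_insert_fresh cs (fun a => a) (fun char => (0 : Int) :: pvCounter char 0 l)
      PySem.Dict.empty (fun a _ => by simp [PySem.Dict.contains_empty]) (by simpa using hnd)]
    rfl
  -- B-side pieces
  have hc0getD : ∀ c : Char, c0.getD c 0 = 0 := by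
    intro c
    rw [hc0def, pv_getD_foldl_insert_const]
    split
    · rfl
    · simp [PySem.Dict.getD_empty]
  have ho0keys : o0.keys = cs := by rw [ho0def]; exact pv_keys_foldl_insert_const _ cs hnd
  have ho0getD : ∀ c ∈ cs, o0.getD c [] = [(0 : Int)] := by
    intro c hc
    rw [ho0def, pv_getD_foldl_insert_const]
    simp [hc]
  have hF1 : F.1 = l.foldl (fun d ch => d.modify ch 0 (· + 1)) c0 := by
    rw [hF]; exact pv_main_fst cs l (c0, o0)
  have hgc : ∀ c : Char, F.1.getD c 0 = ((l.count c : Nat) : Int) := by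
    intro c
    rw [hF1, PySem.Dict.getD_foldl_modify_add_one l c0 c, hc0getD c, zero_add]
  have hF2keys : F.2.keys = cs := by
    rw [hF]; exact pv_main_keys cs l c0 o0 ho0keys
  have hF2getD : ∀ c ∈ cs, F.2.getD c [] = (0 : Int) :: pvCounter c 0 l := by
    intro c hc
    rw [hF, pv_main_occ cs hnd l c0 o0 ho0keys c hc, ho0getD c hc, hc0getD c]
    rfl
  have hF2items : F.2.items = cs.map (fun c => (c, (0 : Int) :: pvCounter c 0 l)) := by
    rw [PySem.Dict.items_eq_map_keys F.2 (by rw [hF2keys]; exact hnd) [], hF2keys]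
    exact List.map_congr_left (fun c hc => by rw [hF2getD c hc])
  have hB1 : pvPref (fun c => F.1.getD c 0) cs 0 = cs.map (fun c => (c, PySem.Chars.find S [c])) := by
    apply List.ext_getElem
    · rw [pv_pref_length, List.length_map]
    · intro p h1 h2
      have hp : p < cs.length := by rwa [pv_pref_length] at h1
      rw [List.getElem_map]
      refine (pv_pref_getElem _ cs 0 p hp).trans ?_
      rw [Prod.mk.injEq]
      refine ⟨rfl, ?_⟩
      rw [zero_add]
      have hmap : (cs.take p).map (fun c => F.1.getD c 0)
          = (cs.take p).map (fun c => ((l.count c : Nat) : Int)) :=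
        List.map_congr_left (fun c _ => hgc c)
      rw [hmap, pv_cast_sum, pv_find_sorted S hSle (cs[p]'hp) (hmemS _ (List.getElem_mem hp))]
      congr 1
      rw [pv_sum_counts (cs.take p) (hnd.sublist (List.take_sublist p cs)) l]
      rw [List.countP_congr (q := fun x => decide (x < cs[p]'hp)) ?_]
      · exact (hSperm.countP_eq _).symm
      · intro x hx
        simp only [decide_eq_true_eq]
        rw [pv_mem_take cs hlt p hp x]
        exact ⟨fun h => h.2, fun h => ⟨(hmem x).mpr hx, h⟩⟩
  -- assemble
  rw [Prod.mk.injEq]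
  refine ⟨?_, ?_⟩
  · rw [hA1, pv_starts_items (fun c => F.1.getD c 0) cs PySem.Dict.empty 0 hnd
      (fun c _ => by simp [PySem.Dict.contains_empty]), hB1]
    rfl
  · rw [hA2, hF2items]

-- ===== VERDICT (by name: the statement is the Claim_ definition above) =====
theorem PreprocessBWT_spec : Claim_equal_PreprocessBWT := by
  intro bwt _
  exact pv_ab bwt
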